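-- pv_equiv track=rewrite | github.com/ChernXiangyu/harmonize-toolkit | keywordGenerator.py | getStringIntersectionList
-- ===== SOURCE A (Python) =====
-- def getStringIntersectionList(stringList: list):
--     stringNum = len(stringList)
--     if stringNum == 0:
--         return []
--     if stringNum == 1:
--         return stringList[0].split()
--     lists = [string.split() for string in stringList]
--     # 将第一个列表转换为集合
--     intersection_set = set(lists[0])
--
--     # 计算交集
--     for lst in lists[1:]:
--         intersection_set = intersection_set.intersection(lst)
--
--     # 保持原始列表中的顺序
--     intersection_list = [x for x in lists[0] if x in intersection_set]
--     return intersection_list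
-- ===== SOURCE B (Python) =====
-- def getStringIntersectionList(stringList: list):
--     if not stringList:
--         return []
--     lists = [s.split() for s in stringList]
--     result = lists[0]
--     for lst in lists[1:]:
--         s = set(lst)
--         result = [x for x in result if x in s]
--     return result
-- ===== Notes on version B (the rewrite author's own statement) =====
-- stated objective: simpler
-- what changed: Replaces A's build-one-global-intersection-set-then-filter-at-the-end (with special cases for 0 and 1 strings) by a single successive-filter fold: result starts as the first word list and each later list filters it through a per-list set; the length-1 special case disappears.
import Mathlib
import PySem

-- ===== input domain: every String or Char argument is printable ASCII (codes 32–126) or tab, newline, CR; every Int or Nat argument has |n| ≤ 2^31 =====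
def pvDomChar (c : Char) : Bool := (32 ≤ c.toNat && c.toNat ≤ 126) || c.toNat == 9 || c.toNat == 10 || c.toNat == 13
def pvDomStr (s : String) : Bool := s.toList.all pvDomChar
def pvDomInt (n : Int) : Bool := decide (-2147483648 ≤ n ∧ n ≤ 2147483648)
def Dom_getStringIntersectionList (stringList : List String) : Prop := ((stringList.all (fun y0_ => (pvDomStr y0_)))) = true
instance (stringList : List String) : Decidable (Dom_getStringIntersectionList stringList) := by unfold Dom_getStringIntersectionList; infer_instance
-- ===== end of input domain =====

-- B replaces A's global intersection set (with 0/1-length special cases) by one successive-filter fold; objective: simpler.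

-- ===== PORT A =====
def getStringIntersectionList (stringList : List String) : List String :=
  if stringList.length = 0 then []
  else if stringList.length = 1 then PySem.Str.split₀ (stringList.headD "")
  else
    let lists := stringList.map PySem.Str.split₀
    let interSet0 : PySem.Set String := PySem.Set.ofList (lists.headD [])
    let interSet := (lists.drop 1).foldl (fun s lst => PySem.Set.inter s lst) interSet0
    (lists.headD []).filter (fun x => interSet.contains x)

-- ===== PORT B =====
def getStringIntersectionList_alt (stringList : List String) : List String :=
  match stringList with
  | [] => []
  | _ =>
    let lists := stringList.map PySem.Str.split₀
    (lists.drop 1).foldl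
      (fun res lst =>
        let s : PySem.Set String := PySem.Set.ofList lst
        res.filter (fun x => s.contains x))
      (lists.headD [])

-- ===== PRECONDITION & SPEC =====
def Spec_getStringIntersectionList (stringList : List String) (out : List String) : Prop := out = getStringIntersectionList_alt stringList
instance (stringList : List String) (out : List String) : Decidable (Spec_getStringIntersectionList stringList out) := by unfold Spec_getStringIntersectionList; infer_instance

-- ===== CLAIM (what is proved, stated in full; the proofs are below) =====
def Claim_equal_getStringIntersectionList : Prop := ∀ (stringList : List String), Dom_getStringIntersectionList stringList → Spec_getStringIntersectionList stringList (getStringIntersectionList stringList)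

-- ===== LEMMAS AND PROOFS =====

-- membership in A's folded intersection set
lemma mem_foldl_inter (rest : List (List String)) (s : PySem.Set String) (x : String) :
    x ∈ rest.foldl (fun s lst => PySem.Set.inter s lst) s ↔ x ∈ s ∧ ∀ l ∈ rest, x ∈ l := by
  induction rest generalizing s with
  | nil => simp
  | cons l rest ih =>
    simp [List.foldl_cons, ih, PySem.Set.mem_inter]
    tauto

-- B's successive filtering collapses to one filter with an 'all' predicate
lemma foldl_filter_eq (rest : List (List String)) (res : List String) :
    rest.foldl (fun res lst => res.filter (fun x => (PySem.Set.ofList lst).contains x)) res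
      = res.filter (fun x => rest.all (fun l => decide (x ∈ l))) := by
  induction rest generalizing res with
  | nil => simp
  | cons l rest ih =>
    simp only [List.foldl_cons, ih, List.filter_filter]
    refine List.filter_congr ?_
    intro x _
    rw [Bool.eq_iff_iff]
    simp only [PySem.Set.contains_eq_decide, Bool.and_eq_true, decide_eq_true_eq,
      List.all_cons, List.all_eq_true, PySem.Set.mem_ofList]
    tauto

-- ===== VERDICT (by name: the statement is the Claim_ definition above) =====
theorem getStringIntersectionList_spec : Claim_equal_getStringIntersectionList := by
  intro stringList _
  unfold Spec_getStringIntersectionList getStringIntersectionList getStringIntersectionList_alt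
  match stringList with
  | [] => simp
  | [s] => simp
  | s :: t :: rest =>
    simp only [List.length_cons, List.map_cons, List.headD_cons, List.drop_succ_cons,
      List.drop_zero, if_neg (by omega : ¬ (rest.length + 1 + 1 = 0)),
      if_neg (by omega : ¬ (rest.length + 1 + 1 = 1))]
    rw [foldl_filter_eq]
    refine List.filter_congr ?_
    intro x hx
    rw [Bool.eq_iff_iff]
    simp only [PySem.Set.contains_eq_decide, decide_eq_true_eq, mem_foldl_inter,
      Bool.and_eq_true, List.all_cons, List.all_eq_true, List.mem_cons,
      List.mem_map, forall_eq_or_imp, forall_exists_index]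
    aesop
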